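-- pv_equiv track=rewrite | github.com/EugeneGouws/TimePyBling | reader/exam_scheduler.py | _pick_spread_slot
-- ===== SOURCE A (Python) =====
-- from collections import defaultdict
--
-- def _pick_spread_slot(
--     valid_slots : list[int],
--     assignment  : dict[str, int],
--     paper_label : str,
--     num_slots   : int,
-- ) -> int:
--     """
--     Choose the slot from valid_slots that best spreads the schedule:
--       1. Fewest papers already in that slot  (primary — even load)
--       2. Maximum minimum gap to same-subject same-grade papers  (secondary)
--     """
--     load: dict[int, int] = defaultdict(int)
--     for s in assignment.values():
--         load[s] += 1
--
--     subj, _, grade = _label_to_parts(paper_label)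
--     same_sg = [
--         assignment[lbl] for lbl in assignment
--         if _label_to_parts(lbl)[0] == subj and _label_to_parts(lbl)[2] == grade
--     ]
--
--     def score(s: int) -> tuple:
--         gap = min(abs(s - o) for o in same_sg) if same_sg else num_slots
--         return (-load[s], gap)
--
--     return max(valid_slots, key=score)
--
-- def _label_to_parts(label: str) -> tuple[str, str, str]:
--     """
--     "MA_P1_Gr12"  ->  ("MA", "P1", "Gr12")
--     Returns ("", "", "") on unexpected format.
--     """
--     parts = label.split("_")
--     if len(parts) >= 3:
--         return parts[0], parts[1], parts[2]
--     return "", "", ""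
-- ===== SOURCE B (Python) =====
-- import bisect
--
-- def _pick_spread_slot(
--     valid_slots : list[int],
--     assignment  : dict[str, int],
--     paper_label : str,
--     num_slots   : int,
-- ) -> int:
--     # Same choice as A, but: same-subject slots are sorted once and each slot's
--     # nearest-neighbour gap found by binary search, and the best slot is kept in
--     # a single running-max scan instead of max(key=...).
--     load: dict[int, int] = {}
--     for s in assignment.values():
--         load[s] = load.get(s, 0) + 1
--
--     sg = _sg(paper_label)
--     same = sorted(v for lbl, v in assignment.items() if _sg(lbl) == sg)
--
--     def gap(s: int) -> int:
--         if not same: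
--             return num_slots
--         i = bisect.bisect_left(same, s)
--         best = None
--         if i > 0:
--             best = s - same[i - 1]
--         if i < len(same):
--             d = same[i] - s
--             if best is None or d < best:
--                 best = d
--         return best
--
--     best_slot = valid_slots[0]
--     bl, bg = -load.get(best_slot, 0), gap(best_slot)
--     for s in valid_slots[1:]:
--         l, g = -load.get(s, 0), gap(s)
--         if (l, g) > (bl, bg):
--             best_slot, bl, bg = s, l, g
--     return best_slot
--
-- def _sg(label: str) -> tuple[str, str]:
--     parts = label.split("_")
--     if len(parts) >= 3:
--         return parts[0], parts[2]
--     return "", ""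
-- ===== Notes on version B (the rewrite author's own statement) =====
-- stated objective: faster
-- what changed: The nearest same-subject-grade distance is computed by sorting those slots once and binary-searching (bisect) per candidate instead of scanning all of them for every candidate, and the best slot is kept by a single running-max scan instead of max(key=...).
-- outside the precondition, e.g. on _pick_spread_slot([], {}, 'MA_P1_Gr12', 3): A raises ValueError, B raises IndexError
import Mathlib
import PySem

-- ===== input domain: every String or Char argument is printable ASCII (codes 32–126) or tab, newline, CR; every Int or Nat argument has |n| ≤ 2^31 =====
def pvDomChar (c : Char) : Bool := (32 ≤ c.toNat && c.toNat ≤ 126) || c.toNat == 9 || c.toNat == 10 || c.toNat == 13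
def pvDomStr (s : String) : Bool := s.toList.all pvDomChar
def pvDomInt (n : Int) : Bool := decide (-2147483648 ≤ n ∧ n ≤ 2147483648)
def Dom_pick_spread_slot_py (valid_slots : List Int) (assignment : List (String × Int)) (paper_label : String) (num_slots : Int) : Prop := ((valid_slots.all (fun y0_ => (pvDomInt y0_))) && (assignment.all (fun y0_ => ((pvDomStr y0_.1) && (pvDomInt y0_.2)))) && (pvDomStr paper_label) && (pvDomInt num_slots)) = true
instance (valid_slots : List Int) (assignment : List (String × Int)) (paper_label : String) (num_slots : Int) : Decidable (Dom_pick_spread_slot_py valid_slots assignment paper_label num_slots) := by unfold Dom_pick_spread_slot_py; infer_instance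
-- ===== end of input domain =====

-- B sorts the same-subject-grade slots once and finds each candidate's nearest-neighbour
-- distance by binary search (bisect) instead of scanning all of them per candidate, and
-- keeps the best slot in one running-max scan instead of max(key=...).

-- ===== PORT A =====

-- "MA_P1_Gr12" -> ("MA","P1","Gr12"); ("","","") on unexpected format
def labelToParts (label : String) : String × String × String :=
  match (PySem.Str.split? label "_").getD [] with
  | p0 :: p1 :: p2 :: _ => (p0, p1, p2)
  | _ => ("", "", "")

def pick_spread_slot_py (valid_slots : List Int) (assignment : List (String × Int)) (paper_label : String) (num_slots : Int) : Int :=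
  let d := PySem.Dict.ofList assignment
  let load := d.values.foldl (fun ld s => PySem.Dict.modify ld s 0 (· + 1))
    (PySem.Dict.empty : PySem.Dict Int Int)
  let parts := labelToParts paper_label
  let same_sg := (d.keys.filter (fun lbl =>
      (labelToParts lbl).1 == parts.1 && (labelToParts lbl).2.2 == parts.2.2)).map
    (fun lbl => (d.get? lbl).getD 0)  -- lbl is a key of d, so get? is always some
  let score := fun (s : Int) =>
    (-(load.getD s 0),
     match PySem.List.min? (same_sg.map (fun o => |s - o|)) (fun x => x) with
     | some g => g
     | none => num_slots)  -- none ↔ same_sg = [], Python's 'if same_sg else num_slots'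
  match PySem.List.max2? valid_slots (fun s => (score s).1) (fun s => (score s).2) with
  | some m => m
  | none => 0  -- unreachable under Pre_ (Python raises ValueError on empty valid_slots)

-- ===== PORT B =====

-- "MA_P1_Gr12" -> ("MA","Gr12"); ("","") on unexpected format
def sgOf (label : String) : String × String :=
  match (PySem.Str.split? label "_").getD [] with
  | p0 :: _ :: p2 :: _ => (p0, p2)
  | _ => ("", "")

-- Source B's gap(): bisect on the sorted list (both indices are provably in range there,
-- so List.getD's default is never used where Python would raise)
def altGap (same : List Int) (num_slots s : Int) : Int :=
  if same.isEmpty then num_slots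
  else
    let i := PySem.List.bisectLeft same s
    let best : Option Int := if 0 < i then some (s - same.getD (i - 1) 0) else none
    let best : Option Int :=
      if i < same.length then
        let d := same.getD i 0 - s
        match best with
        | none => some d
        | some b => if d < b then some d else some b
      else best
    best.getD 0  -- best is some here since same ≠ []

def pick_spread_slot_py_alt (valid_slots : List Int) (assignment : List (String × Int)) (paper_label : String) (num_slots : Int) : Int :=
  let d := PySem.Dict.ofList assignment
  let load := d.values.foldl (fun ld s => PySem.Dict.modify ld s 0 (· + 1))
    (PySem.Dict.empty : PySem.Dict Int Int)
  let sg := sgOf paper_label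
  let same := PySem.List.sorted ((d.items.filter (fun p => sgOf p.1 == sg)).map Prod.snd)
    (fun x => x) false
  match valid_slots with
  | [] => 0  -- unreachable under Pre_ (Python raises IndexError on empty valid_slots)
  | v0 :: rest =>
    (rest.foldl (fun (b : Int × Int × Int) s =>
        let l := -(load.getD s 0)
        let g := altGap same num_slots s
        if b.2.1 < l ∨ (b.2.1 = l ∧ b.2.2 < g) then (s, l, g) else b)
      (v0, -(load.getD v0 0), altGap same num_slots v0)).1

-- ===== PRECONDITION & SPEC =====
-- Python A raises ValueError (max() of an empty sequence) when valid_slots is empty; excluded.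
def Pre_pick_spread_slot_py (valid_slots : List Int) (assignment : List (String × Int)) (paper_label : String) (num_slots : Int) : Prop := valid_slots ≠ []
instance (valid_slots : List Int) (assignment : List (String × Int)) (paper_label : String) (num_slots : Int) : Decidable (Pre_pick_spread_slot_py valid_slots assignment paper_label num_slots) := by unfold Pre_pick_spread_slot_py; infer_instance

def pvWitness_pick_spread_slot_py : List Int × (List (String × Int)) × String × Int :=
  ([0, 1, 2], [("MA_P1_Gr12", 0), ("EN_P1_Gr12", 1)], "MA_P2_Gr12", 3)

def Spec_pick_spread_slot_py (valid_slots : List Int) (assignment : List (String × Int)) (paper_label : String) (num_slots : Int) (out : Int) : Prop := out = pick_spread_slot_py_alt valid_slots assignment paper_label num_slots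
instance (valid_slots : List Int) (assignment : List (String × Int)) (paper_label : String) (num_slots : Int) (out : Int) : Decidable (Spec_pick_spread_slot_py valid_slots assignment paper_label num_slots out) := by unfold Spec_pick_spread_slot_py; infer_instance

-- ===== CLAIM (what is proved, stated in full; the proofs are below) =====
def Claim_equal_pick_spread_slot_py : Prop := ∀ (valid_slots : List Int) (assignment : List (String × Int)) (paper_label : String) (num_slots : Int), Dom_pick_spread_slot_py valid_slots assignment paper_label num_slots → Pre_pick_spread_slot_py valid_slots assignment paper_label num_slots → Spec_pick_spread_slot_py valid_slots assignment paper_label num_slots (pick_spread_slot_py valid_slots assignment paper_label num_slots)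

-- ===== LEMMAS AND PROOFS =====

theorem sgOf_eq_parts (lbl : String) :
    sgOf lbl = ((labelToParts lbl).1, (labelToParts lbl).2.2) := by
  unfold sgOf labelToParts
  rcases (PySem.Str.split? lbl "_").getD [] with _ | ⟨a, _ | ⟨b, _ | c⟩⟩ <;> rfl

-- the two same-subject-grade slot lists (before B sorts) are equal
theorem same_list_eq (d : PySem.Dict String Int) (hnd : d.keys.Nodup) (subj grade : String) :
    (d.items.filter (fun p => sgOf p.1 == (subj, grade))).map Prod.snd
      = (d.keys.filter (fun lbl =>
          (labelToParts lbl).1 == subj && (labelToParts lbl).2.2 == grade)).map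
        (fun lbl => (d.get? lbl).getD 0) := by
  rw [PySem.Dict.items_eq_map_keys d hnd 0, List.filter_map, List.map_map]
  congr 1
  · apply List.filter_congr
    intro k _
    simp only [Function.comp, sgOf_eq_parts]
    rfl

-- altGap on a sorted nonempty list returns a realised distance that is minimal
theorem altGap_spec (ys : List Int) (hs : ys.Pairwise (· ≤ ·)) (hne : ys ≠ [])
    (ns s : Int) :
    altGap ys ns s ∈ ys.map (fun o => |s - o|) ∧
      ∀ y ∈ ys.map (fun o => |s - o|), altGap ys ns s ≤ y := by
  have hlen : 0 < ys.length := List.length_pos_iff.mpr hne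
  obtain ⟨hile, hlt, hge⟩ := PySem.List.bisectLeft_spec ys s hs
  have hmono : ∀ (a b : ℕ) (ha : a < ys.length) (hb : b < ys.length), a ≤ b → ys[a] ≤ ys[b] := by
    intro a b ha hb hab
    rcases Nat.lt_or_eq_of_le hab with h | h
    · exact (List.pairwise_iff_getElem.mp hs) a b ha hb h
    · subst h; rfl
  set i := PySem.List.bisectLeft ys s with hi
  have key : ∀ (v : Int), (∃ j, ∃ hj : j < ys.length, v = |s - ys[j]|) →
      (∀ (j : ℕ) (hj : j < ys.length), v ≤ |s - ys[j]|) →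
      altGap ys ns s = v → altGap ys ns s ∈ ys.map (fun o => |s - o|) ∧
      ∀ y ∈ ys.map (fun o => |s - o|), altGap ys ns s ≤ y := by
    intro v ⟨j, hj, hv⟩ hub hval
    constructor
    · rw [hval, hv]; exact List.mem_map.mpr ⟨ys[j], List.getElem_mem hj, rfl⟩
    · intro y hy
      obtain ⟨o, ho, rfl⟩ := List.mem_map.mp hy
      obtain ⟨k, hk, rfl⟩ := List.mem_iff_getElem.mp ho
      rw [hval]; exact hub k hk
  have hne' : ys.isEmpty = false := by simpa [List.isEmpty_iff]
  by_cases hi0 : 0 < i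
  · by_cases hiL : i < ys.length
    · -- middle: min of the two candidates
      have hi1 : i - 1 < ys.length := by omega
      have hlow : ys[i-1] < s := hlt (i-1) hi1 (by omega)
      have hhigh : s ≤ ys[i] := hge i hiL (le_refl _)
      have hval : altGap ys ns s = if ys[i] - s < s - ys[i-1] then ys[i] - s else s - ys[i-1] := by
        simp only [altGap, hne', Bool.false_eq_true, ite_false, ← hi,
          if_pos hi0, if_pos hiL, List.getD_eq_getElem _ _ hi1, List.getD_eq_getElem _ _ hiL]
        split <;> rfl
      have hub : ∀ (j : ℕ) (hj : j < ys.length),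
          (if ys[i] - s < s - ys[i-1] then ys[i] - s else s - ys[i-1]) ≤ |s - ys[j]| := by
        intro j hj
        rcases Nat.lt_or_ge j i with hji | hji
        · have h1 : ys[j] ≤ ys[i-1] := hmono j (i-1) hj hi1 (by omega)
          have h2 : ys[j] < s := hlt j hj hji
          rw [abs_of_pos (by omega)]
          split <;> omega
        · have h1 : ys[i] ≤ ys[j] := hmono i j hiL hj hji
          have h2 : s ≤ ys[j] := le_trans hhigh h1
          rw [abs_of_nonpos (by omega), neg_sub]
          split <;> omega
      refine key _ ?_ hub hval
      split
      · exact ⟨i, hiL, by rw [abs_of_nonpos (by omega), neg_sub]⟩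
      · exact ⟨i-1, hi1, by rw [abs_of_pos (by omega)]⟩
    · -- i = length: every element is below s
      have hi1 : i - 1 < ys.length := by omega
      have hval : altGap ys ns s = s - ys[i-1] := by
        simp only [altGap, hne', Bool.false_eq_true, ite_false, ← hi,
          if_pos hi0, if_neg hiL, List.getD_eq_getElem _ _ hi1]
        rfl
      refine key _ ⟨i-1, hi1, by rw [abs_of_pos (by have := hlt (i-1) hi1 (by omega); omega)]⟩ ?_ hval
      intro j hj
      have h2 : ys[j] < s := hlt j hj (by omega)
      have h1 : ys[j] ≤ ys[i-1] := hmono j (i-1) hj hi1 (by omega)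
      rw [abs_of_pos (by omega)]; omega
  · -- i = 0: every element is at or above s
    have hiL : i < ys.length := by omega
    have hval : altGap ys ns s = ys[i] - s := by
      simp only [altGap, hne', Bool.false_eq_true, ite_false, ← hi,
        if_neg hi0, if_pos hiL, List.getD_eq_getElem _ _ hiL]
      rfl
    have hhigh : s ≤ ys[i] := hge i hiL (le_refl _)
    refine key _ ⟨i, hiL, by rw [abs_of_nonpos (by omega), neg_sub]⟩ ?_ hval
    intro j hj
    have h1 : ys[i] ≤ ys[j] := hmono i j hiL hj (by omega)
    rw [abs_of_nonpos (by omega), neg_sub]; omega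

-- A's min-scan gap equals B's bisect gap on the sorted copy
theorem gap_eq (L : List Int) (ns s : Int) :
    (match PySem.List.min? (L.map (fun o => |s - o|)) (fun x => x) with
     | some g => g
     | none => ns)
      = altGap (PySem.List.sorted L (fun x => x) false) ns s := by
  rcases hL : L with _ | ⟨x, t⟩
  · rfl
  · set L' := x :: t
    set S := PySem.List.sorted L' (fun x => x) false with hS
    have hperm : S.Perm L' := PySem.List.sorted_perm L' (fun x => x) false
    have hSne : S ≠ [] := by
      intro h; rw [h] at hperm; exact (List.cons_ne_nil x t) (hperm.nil_eq).symm
    have hpair : S.Pairwise (· ≤ ·) := PySem.List.sorted_pairwise L' (fun x => x)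
    obtain ⟨hmem, hmin⟩ := altGap_spec S hpair hSne ns s
    have hpm : (S.map (fun o => |s - o|)).Perm (L'.map (fun o => |s - o|)) := hperm.map _
    rcases hm : PySem.List.min? (L'.map (fun o => |s - o|)) (fun x => x) with _ | g
    · rw [PySem.List.min?_eq_none_iff] at hm
      simp at hm
    · simp only []
      have hg1 : g ∈ L'.map (fun o => |s - o|) := PySem.List.min?_mem hm
      have hg2 : ∀ y ∈ L'.map (fun o => |s - o|), g ≤ y := PySem.List.min?_isMin hm
      have h1 : g ≤ altGap S ns s := hg2 _ (hpm.mem_iff.mp hmem)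
      have h2 : altGap S ns s ≤ g := hmin _ (hpm.mem_iff.mpr hg1)
      omega

-- Python's max(key) fold equals B's explicit running-max scan, given pointwise-equal keys
theorem max_fold_eq (k1 k2 k1' k2' : Int → Int) (h1 : ∀ s, k1 s = k1' s)
    (h2 : ∀ s, k2 s = k2' s) (v0 : Int) (rest : List Int) :
    PySem.List.max2? (v0 :: rest) k1 k2
      = some ((rest.foldl (fun (b : Int × Int × Int) s =>
            let l := k1' s
            let g := k2' s
            if b.2.1 < l ∨ (b.2.1 = l ∧ b.2.2 < g) then (s, l, g) else b)
          (v0, k1' v0, k2' v0)).1) := by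
  unfold PySem.List.max2?
  simp only [List.foldl_cons]
  induction rest generalizing v0 with
  | nil => rfl
  | cons x t ih =>
    simp only [List.foldl_cons]
    have hcond : (decide (k1 v0 < k1 x) || !decide (k1 x < k1 v0) && decide (k2 v0 < k2 x))
        = decide (k1' v0 < k1' x ∨ (k1' v0 = k1' x ∧ k2' v0 < k2' x)) := by
      rw [h1, h1, h2, h2]
      have hb : (decide (k1' v0 < k1' x) || !decide (k1' x < k1' v0) && decide (k2' v0 < k2' x))
          = decide (k1' v0 < k1' x ∨ (¬ k1' x < k1' v0 ∧ k2' v0 < k2' x)) := by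
        by_cases p : k1' v0 < k1' x <;> by_cases q : k1' x < k1' v0 <;>
          by_cases r : k2' v0 < k2' x <;> simp [p, q, r]
      rw [hb, decide_eq_decide]
      omega
    by_cases hP : k1' v0 < k1' x ∨ (k1' v0 = k1' x ∧ k2' v0 < k2' x)
    · have : (decide (k1 v0 < k1 x) || !decide (k1 x < k1 v0) && decide (k2 v0 < k2 x)) = true := by
        rw [hcond]; exact decide_eq_true hP
      rw [this]
      simpa [hP] using ih x
    · have : (decide (k1 v0 < k1 x) || !decide (k1 x < k1 v0) && decide (k2 v0 < k2 x)) = false := by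
        rw [hcond]; exact decide_eq_false hP
      rw [this]
      simpa [hP] using ih v0

-- ===== VERDICT (by name: the statement is the Claim_ definition above) =====
theorem pick_spread_slot_py_spec : Claim_equal_pick_spread_slot_py := by
  intro vs a p n _ hne
  unfold Spec_pick_spread_slot_py
  rcases vs with _ | ⟨v0, rest⟩
  · exact absurd rfl hne
  simp only [pick_spread_slot_py, pick_spread_slot_py_alt]
  set d := PySem.Dict.ofList a with hd
  have hsame : (d.items.filter (fun q => sgOf q.1 == sgOf p)).map Prod.snd
      = (d.keys.filter (fun lbl =>
          (labelToParts lbl).1 == (labelToParts p).1 &&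
          (labelToParts lbl).2.2 == (labelToParts p).2.2)).map
        (fun lbl => (d.get? lbl).getD 0) := by
    rw [sgOf_eq_parts p]
    exact same_list_eq d (PySem.Dict.nodup_keys_ofList a) _ _
  rw [max_fold_eq
    (k1' := fun s => -((d.values.foldl (fun ld s => PySem.Dict.modify ld s 0 (· + 1))
      (PySem.Dict.empty : PySem.Dict Int Int)).getD s 0))
    (k2' := fun s => altGap (PySem.List.sorted
      ((d.items.filter (fun q => sgOf q.1 == sgOf p)).map Prod.snd) (fun x => x) false) n s)
    (h1 := fun _ => rfl)
    (h2 := fun s => by rw [hsame]; exact gap_eq _ n s)]
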